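-- pv_equiv track=rewrite | github.com/D4RK228/Poker_fake | gotoproject/SuperAI_NAGIBATOR_2000.py | kicker
-- ===== SOURCE A (Python) =====
-- def kicker(player, data_cards, k_player):
--     data_comb = []
--     data_comb.append(data_cards[player*2 - 1])
--     data_comb.append(data_cards[player*2 - 2])
--     for i in range(5):
--         data_comb.append(data_cards[k_player*2 + i])
--     for i in range(7):
--         data_comb[i] = data_comb[i] % 13
--     for i in range(7):
--         if(data_comb[i] == 0):
--             data_comb[i] = 13
--     s = 0
--     data_comb.sort()
--     data_comb.reverse()
--     s += data_comb[0]
--     data_comb[0] = 0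
--
--     for i in range(4):
--         data_comb.sort()
--         data_comb.reverse()
--         s *= 100
--         s += data_comb[0]
--         data_comb[0] = -1
--     return s
-- ===== SOURCE B (Python) =====
-- def kicker(player, data_cards, k_player):
--     idxs = [player*2 - 1, player*2 - 2] + [k_player*2 + i for i in range(5)]
--     ranks = [(data_cards[j] % 13) or 13 for j in idxs]
--     ranks.sort(reverse=True)
--     s = 0
--     for r in ranks[:5]:
--         s = s*100 + r
--     return s
-- ===== Notes on version B (the rewrite author's own statement) =====
-- stated objective: simpler
-- what changed: Replaces A's five rounds of sort+reverse+blank-the-head (selection by repeated re-sorting with sentinel overwrites 0/-1) with a single descending sort followed by a fold of the top five ranks into s = s*100 + r.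
import Mathlib
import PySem

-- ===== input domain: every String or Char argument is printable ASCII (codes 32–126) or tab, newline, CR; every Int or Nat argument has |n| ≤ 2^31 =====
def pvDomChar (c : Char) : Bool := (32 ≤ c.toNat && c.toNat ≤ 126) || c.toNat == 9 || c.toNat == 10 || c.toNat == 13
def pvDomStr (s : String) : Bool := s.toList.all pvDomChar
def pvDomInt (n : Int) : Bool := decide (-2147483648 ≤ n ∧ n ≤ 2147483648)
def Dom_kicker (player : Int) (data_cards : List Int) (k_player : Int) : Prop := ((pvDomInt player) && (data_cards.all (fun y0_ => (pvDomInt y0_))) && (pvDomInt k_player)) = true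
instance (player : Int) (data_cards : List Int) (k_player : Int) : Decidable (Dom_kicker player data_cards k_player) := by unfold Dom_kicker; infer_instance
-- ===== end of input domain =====

-- B replaces A's five rounds of sort/reverse/blank-the-head with one descending sort
-- plus a fold of the top five ranks (objective: simpler; same return value).

-- ===== PORT A =====
def kicker (player : Int) (data_cards : List Int) (k_player : Int) : Int :=
  let dc : List Int := []
  let dc := dc ++ [PySem.List.pyGetD data_cards (player * 2 - 1) 0]
  let dc := dc ++ [PySem.List.pyGetD data_cards (player * 2 - 2) 0]
  let dc := (PySem.List.pyRange 0 5 1).foldl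
    (fun l i => l ++ [PySem.List.pyGetD data_cards (k_player * 2 + i) 0]) dc
  let dc := (PySem.List.pyRange 0 7 1).foldl
    (fun l i => PySem.List.pySetD l i (PySem.Int.mod (PySem.List.pyGetD l i 0) 13)) dc
  let dc := (PySem.List.pyRange 0 7 1).foldl
    (fun l i => if PySem.List.pyGetD l i 0 = 0 then PySem.List.pySetD l i 13 else l) dc
  let s : Int := 0
  let dc := PySem.List.sorted dc (fun x => x) false
  let dc := dc.reverse
  let s := s + PySem.List.pyGetD dc 0 0
  let dc := PySem.List.pySetD dc 0 0
  let sd := (PySem.List.pyRange 0 4 1).foldl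
    (fun (p : Int × List Int) _i =>
      let dc := PySem.List.sorted p.2 (fun x => x) false
      let dc := dc.reverse
      let s := p.1 * 100
      let s := s + PySem.List.pyGetD dc 0 0
      let dc := PySem.List.pySetD dc 0 (-1)
      (s, dc)) (s, dc)
  sd.1

-- ===== PORT B =====
def kicker_alt (player : Int) (data_cards : List Int) (k_player : Int) : Int :=
  let idxs := [player * 2 - 1, player * 2 - 2] ++
    (PySem.List.pyRange 0 5 1).map (fun i => k_player * 2 + i)
  let ranks := idxs.map (fun j =>
    let m := PySem.Int.mod (PySem.List.pyGetD data_cards j 0) 13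
    if m = 0 then 13 else m)
  let ranks := PySem.List.sorted ranks (fun x => x) true
  (PySem.List.slice ranks none (some 5)).foldl (fun s r => s * 100 + r) 0

-- ===== PRECONDITION & SPEC =====
-- Pre_ excludes exactly the inputs on which Python A raises IndexError: each of the
-- seven card indices must be in range (Python's negative-index wraparound included).
def Pre_kicker (player : Int) (data_cards : List Int) (k_player : Int) : Prop :=
  PySem.Raise.InRange data_cards.length (player * 2 - 1) ∧
  PySem.Raise.InRange data_cards.length (player * 2 - 2) ∧
  PySem.Raise.InRange data_cards.length (k_player * 2 + 0) ∧
  PySem.Raise.InRange data_cards.length (k_player * 2 + 1) ∧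
  PySem.Raise.InRange data_cards.length (k_player * 2 + 2) ∧
  PySem.Raise.InRange data_cards.length (k_player * 2 + 3) ∧
  PySem.Raise.InRange data_cards.length (k_player * 2 + 4)
instance (player : Int) (data_cards : List Int) (k_player : Int) : Decidable (Pre_kicker player data_cards k_player) := by unfold Pre_kicker; infer_instance

def pvWitness_kicker : Int × List Int × Int := (1, [1, 2, 3, 4, 5, 6, 7], 1)

def Spec_kicker (player : Int) (data_cards : List Int) (k_player : Int) (out : Int) : Prop := out = kicker_alt player data_cards k_player
instance (player : Int) (data_cards : List Int) (k_player : Int) (out : Int) : Decidable (Spec_kicker player data_cards k_player out) := by unfold Spec_kicker; infer_instance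

-- ===== CLAIM (what is proved, stated in full; the proofs are below) =====
def Claim_equal_kicker : Prop := ∀ (player : Int) (data_cards : List Int) (k_player : Int), Dom_kicker player data_cards k_player → Pre_kicker player data_cards k_player → Spec_kicker player data_cards k_player (kicker player data_cards k_player)

-- ===== LEMMAS AND PROOFS =====

-- each normalised rank is at least 1
theorem rank_ge_one (v : Int) :
    1 ≤ (if PySem.Int.mod v 13 = 0 then 13 else PySem.Int.mod v 13) := by
  have h0 : 0 ≤ PySem.Int.mod v 13 := Int.fmod_nonneg_of_pos v (by norm_num)
  split_ifs with h
  · norm_num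
  · omega

-- pySetD at index 0 of a nonempty list replaces the head
theorem pySetD_zero_cons (x v : Int) (t : List Int) :
    PySem.List.pySetD (x :: t) 0 v = v :: t := by
  simp [PySem.List.pySetD, PySem.List.pySet?, PySem.List.pyIdx?]

-- Python's sort-then-reverse equals sorted(…, reverse=True) on Int values
theorem sort_reverse_eq_sorted_rev (l : List Int) :
    (PySem.List.sorted l (fun x => x) false).reverse =
      PySem.List.sorted l (fun x => x) true := by
  have hp : (PySem.List.sorted l (fun x => x) true).reverse.Pairwise (fun a b => a ≤ b) := by
    rw [List.pairwise_reverse]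
    exact PySem.List.sorted_pairwise_rev l (fun x => x)
  have hperm : (PySem.List.sorted l (fun x => x) true).reverse.Perm l :=
    (List.reverse_perm _).trans (PySem.List.sorted_perm l _ _)
  have := PySem.List.sorted_id_eq_of_perm_of_pairwise l
    ((PySem.List.sorted l (fun x => x) true).reverse) hperm hp
  rw [this, List.reverse_reverse]

-- sorting x :: (u ++ p) descending, where u is the live descending run of ranks ≥ 1
-- and x, p are blanked sentinels ≤ 0 whose descending arrangement is q
theorem sorted_desc_cons_low (x : Int) (u p q : List Int)
    (hu1 : ∀ y ∈ u, 1 ≤ y) (hu2 : u.Pairwise (fun a b => b ≤ a))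
    (hq : q.Perm (x :: p)) (hq2 : q.Pairwise (fun a b => b ≤ a))
    (hq3 : ∀ y ∈ q, y ≤ 0) :
    (PySem.List.sorted (x :: (u ++ p)) (fun y => y) false).reverse = u ++ q := by
  have hperm : (q.reverse ++ u.reverse).Perm (x :: (u ++ p)) := by
    refine ((List.reverse_perm q).append (List.reverse_perm u)).trans ?_
    refine (hq.append_right u).trans ?_
    show (x :: (p ++ u)).Perm (x :: (u ++ p))
    exact List.Perm.cons x (List.perm_append_comm)
  have hpair : (q.reverse ++ u.reverse).Pairwise (fun a b : Int => a ≤ b) := by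
    rw [List.pairwise_append]
    refine ⟨by rw [List.pairwise_reverse]; exact hq2, by rw [List.pairwise_reverse]; exact hu2, ?_⟩
    intro a ha b hb
    have ha' : a ≤ 0 := hq3 a (List.mem_reverse.mp ha)
    have hb' : 1 ≤ b := hu1 b (List.mem_reverse.mp hb)
    omega
  have h := PySem.List.sorted_id_eq_of_perm_of_pairwise (x :: (u ++ p))
    (q.reverse ++ u.reverse) hperm hpair
  rw [h]
  simp

-- A's in-place index loops over range(7) applied to a list are a map
theorem foldl_update_aux (f : Int → Int) (g : List Int → Int → List Int)
    (hg : ∀ (pre suf : List Int) (x : Int), g (pre ++ x :: suf) (pre.length : Int) = pre ++ f x :: suf) :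
    ∀ (suf pre : List Int),
      (PySem.List.pyRange (pre.length : Int) ((pre.length + suf.length : Nat) : Int) 1).foldl g (pre ++ suf)
        = pre ++ suf.map f := by
  intro suf
  induction suf with
  | nil => intro pre; simp [PySem.List.pyRange]
  | cons x t ih =>
    intro pre
    rw [PySem.List.pyRange_one_cons (by simp only [List.length_cons]; push_cast; omega)]
    simp only [List.foldl]
    rw [hg, List.append_cons]
    have hn : pre.length + (x :: t).length = (pre ++ [f x]).length + t.length := by
      simp only [List.length_append, List.length_cons, List.length_nil]; omega
    have hc : ((pre.length : Int) + 1) = (((pre ++ [f x]).length : Nat) : Int) := by simp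
    rw [hn, hc, ih (pre ++ [f x])]
    simp

theorem loop1_eq (l : List Int) (h : l.length = 7) :
    (PySem.List.pyRange 0 7 1).foldl
      (fun acc i => PySem.List.pySetD acc i (PySem.Int.mod (PySem.List.pyGetD acc i 0) 13)) l
      = l.map (fun x => PySem.Int.mod x 13) := by
  have hg : ∀ (pre suf : List Int) (x : Int),
      PySem.List.pySetD (pre ++ x :: suf) (pre.length : Int)
        (PySem.Int.mod (PySem.List.pyGetD (pre ++ x :: suf) (pre.length : Int) 0) 13)
      = pre ++ (PySem.Int.mod x 13) :: suf := by
    intro pre suf x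
    have hget : PySem.List.pyGetD (pre ++ x :: suf) (pre.length : Int) 0 = x := by
      simp [PySem.List.pyGetD]
    have hlt : pre.length < (pre ++ x :: suf).length := by simp
    rw [hget]
    simp [PySem.List.pySetD, PySem.List.pySet?_natCast _ _ _ hlt, List.set_append_right]
  have := foldl_update_aux (fun x => PySem.Int.mod x 13)
    (fun acc i => PySem.List.pySetD acc i (PySem.Int.mod (PySem.List.pyGetD acc i 0) 13)) hg l []
  simpa [h] using this

theorem loop2_eq (l : List Int) (h : l.length = 7) :
    (PySem.List.pyRange 0 7 1).foldl
      (fun acc i => if PySem.List.pyGetD acc i 0 = 0 then PySem.List.pySetD acc i 13 else acc) l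
      = l.map (fun x => if x = 0 then 13 else x) := by
  have hg : ∀ (pre suf : List Int) (x : Int),
      (if PySem.List.pyGetD (pre ++ x :: suf) (pre.length : Int) 0 = 0
       then PySem.List.pySetD (pre ++ x :: suf) (pre.length : Int) 13
       else pre ++ x :: suf)
      = pre ++ (if x = 0 then 13 else x) :: suf := by
    intro pre suf x
    have hget : PySem.List.pyGetD (pre ++ x :: suf) (pre.length : Int) 0 = x := by
      simp [PySem.List.pyGetD]
    have hlt : pre.length < (pre ++ x :: suf).length := by simp
    rw [hget]
    split_ifs with hx
    · subst hx
      simp [PySem.List.pySetD, PySem.List.pySet?_natCast _ _ _ hlt, List.set_append_right]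
    · rfl
  have := foldl_update_aux (fun x => if x = 0 then 13 else x)
    (fun acc i => if PySem.List.pyGetD acc i 0 = 0 then PySem.List.pySetD acc i 13 else acc) hg l []
  simpa [h] using this

-- the core: on any 7-list of ranks ≥ 1, A's blanking loop equals B's take-5 fold
theorem core_eq (rs : List Int) (hlen : rs.length = 7) (hge : ∀ r ∈ rs, 1 ≤ r) :
    (let s : Int := 0
     let dc := PySem.List.sorted rs (fun x => x) false
     let dc := dc.reverse
     let s := s + PySem.List.pyGetD dc 0 0
     let dc := PySem.List.pySetD dc 0 0
     let sd := (PySem.List.pyRange 0 4 1).foldl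
       (fun (p : Int × List Int) _i =>
         let dc := PySem.List.sorted p.2 (fun x => x) false
         let dc := dc.reverse
         let s := p.1 * 100
         let s := s + PySem.List.pyGetD dc 0 0
         let dc := PySem.List.pySetD dc 0 (-1)
         (s, dc)) (s, dc)
     sd.1) =
    (PySem.List.slice (PySem.List.sorted rs (fun x => x) true) none (some 5)).foldl
      (fun s r => s * 100 + r) 0 := by
  show ((PySem.List.pyRange 0 4 1).foldl
      (fun (p : Int × List Int) _i =>
        (p.1 * 100 + PySem.List.pyGetD (PySem.List.sorted p.2 (fun x => x) false).reverse 0 0,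
         PySem.List.pySetD (PySem.List.sorted p.2 (fun x => x) false).reverse 0 (-1)))
      (0 + PySem.List.pyGetD (PySem.List.sorted rs (fun x => x) false).reverse 0 0,
       PySem.List.pySetD (PySem.List.sorted rs (fun x => x) false).reverse 0 0)).1
    = (PySem.List.slice (PySem.List.sorted rs (fun x => x) true) none (some 5)).foldl
        (fun s r => s * 100 + r) 0
  have hs := sort_reverse_eq_sorted_rev rs
  obtain ⟨a, b, c, d, e, f, g, h7⟩ :
      ∃ a b c d e f g : Int, PySem.List.sorted rs (fun x => x) true = [a, b, c, d, e, f, g] := by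
    have hl : (PySem.List.sorted rs (fun x => x) true).length = 7 := by
      rw [PySem.List.length_sorted, hlen]
    rcases hM : PySem.List.sorted rs (fun x => x) true with _ | ⟨a, _ | ⟨b, _ | ⟨c, _ | ⟨d, _ | ⟨e, _ | ⟨f, _ | ⟨g, _ | ⟨x, t⟩⟩⟩⟩⟩⟩⟩⟩ <;>
      simp_all
  have hpw : ([a, b, c, d, e, f, g] : List Int).Pairwise (fun x y => y ≤ x) := by
    rw [← h7]; exact PySem.List.sorted_pairwise_rev rs _
  have hmem : ∀ y ∈ ([a, b, c, d, e, f, g] : List Int), 1 ≤ y := by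
    intro y hy
    exact hge y ((PySem.List.mem_sorted rs _ _ y).mp (h7 ▸ hy))
  simp only [List.pairwise_cons, List.mem_cons, List.not_mem_nil, or_false, forall_eq_or_imp,
    forall_eq, List.Pairwise.nil, and_true] at hpw hmem
  obtain ⟨⟨hab, hac, had, hae, haf, hag⟩, ⟨hbc, hbd, hbe, hbf, hbg⟩, ⟨hcd, hce, hcf⟩, hrest⟩ := hpw
  obtain ⟨h1a, h1b, h1c, h1d, h1e, h1f, h1g⟩ := hmem
  rw [hs, h7]
  have e1 : (PySem.List.sorted (0 :: b :: c :: d :: e :: f :: g :: ([] : List Int)) (fun y => y) false).reverse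
      = b :: c :: d :: e :: f :: g :: 0 :: [] := by
    simpa using sorted_desc_cons_low 0 [b, c, d, e, f, g] [] [0]
      (by simp; omega)
      (by simp [List.pairwise_cons]; omega)
      (by decide) (by decide) (by decide)
  have e2 : (PySem.List.sorted ((-1) :: c :: d :: e :: f :: g :: 0 :: ([] : List Int)) (fun y => y) false).reverse
      = c :: d :: e :: f :: g :: 0 :: (-1) :: [] := by
    simpa using sorted_desc_cons_low (-1) [c, d, e, f, g] [0] [0, -1]
      (by simp; omega)
      (by simp [List.pairwise_cons]; omega)
      (by decide) (by decide) (by decide)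
  have e3 : (PySem.List.sorted ((-1) :: d :: e :: f :: g :: 0 :: (-1) :: ([] : List Int)) (fun y => y) false).reverse
      = d :: e :: f :: g :: 0 :: (-1) :: (-1) :: [] := by
    simpa using sorted_desc_cons_low (-1) [d, e, f, g] [0, -1] [0, -1, -1]
      (by simp; omega)
      (by simp [List.pairwise_cons]; omega)
      (by decide) (by decide) (by decide)
  have e4 : (PySem.List.sorted ((-1) :: e :: f :: g :: 0 :: (-1) :: (-1) :: ([] : List Int)) (fun y => y) false).reverse
      = e :: f :: g :: 0 :: (-1) :: (-1) :: (-1) :: [] := by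
    simpa using sorted_desc_cons_low (-1) [e, f, g] [0, -1, -1] [0, -1, -1, -1]
      (by simp; omega)
      (by simp [List.pairwise_cons]; omega)
      (by decide) (by decide) (by decide)
  rw [show PySem.List.pyRange 0 4 1 = [0, 1, 2, 3] from by decide]
  simp only [List.foldl, PySem.List.pyGetD_zero_cons, pySetD_zero_cons]
  rw [e1]
  simp only [PySem.List.pyGetD_zero_cons, pySetD_zero_cons]
  rw [e2]
  simp only [PySem.List.pyGetD_zero_cons, pySetD_zero_cons]
  rw [e3]
  simp only [PySem.List.pyGetD_zero_cons, pySetD_zero_cons]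
  rw [e4]
  simp only [PySem.List.pyGetD_zero_cons]
  rw [PySem.List.slice_to _ (by norm_num)]
  simp only [show ((5:Int)).toNat = 5 from rfl, List.take_succ_cons, List.take_zero, List.foldl]
  ring

-- ===== VERDICT (by name: the statement is the Claim_ definition above) =====
theorem kicker_spec : Claim_equal_kicker := by
  intro player data_cards k_player _hdom _hpre
  unfold Spec_kicker
  simp only [kicker, kicker_alt]
  rw [show PySem.List.pyRange 0 5 1 = [0, 1, 2, 3, 4] from by decide]
  simp only [List.foldl, List.map, List.nil_append, List.cons_append]
  rw [loop1_eq _ (by simp), loop2_eq _ (by simp)]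
  simp only [List.map]
  exact core_eq _ (by simp) (by
    intro r hr
    simp only [List.mem_cons, List.not_mem_nil, or_false] at hr
    rcases hr with rfl | rfl | rfl | rfl | rfl | rfl | rfl <;> exact rank_ge_one _)
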